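-- pv_equiv track=rewrite | github.com/wuchen0901/algorithm | knapsack/counting.py | count_combinations_unbounded_v5
-- ===== SOURCE A (Python) =====
-- from typing import Dict, List
--
-- def count_combinations_unbounded_v5(nums: List[int], target: int) -> int:
--     dp = [0] * (target + 1)
--     dp[0] = 1
--     for x in nums:
--         if x <= 0:
--             continue
--         for total in range(x, target + 1):
--             dp[total] += dp[total - x]
--     return dp[target]
-- ===== SOURCE B (Python) =====
-- def count_combinations_unbounded_v5(nums, target):
--     # Combination-counting DP, but each coin's pass builds a fresh table by
--     # walking residue classes mod x with a running prefix sum, instead of an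
--     # in-place ascending sweep.
--     dp = [1 if t == 0 else 0 for t in range(target + 1)]
--     for x in nums:
--         if x <= 0 or x > target:
--             continue
--         new = [0] * (target + 1)
--         for s in range(x):
--             running = 0
--             t = s
--             while t <= target:
--                 running += dp[t]
--                 new[t] = running
--                 t += x
--         dp = new
--     return dp[target]
-- ===== Notes on version B (the rewrite author's own statement) =====
-- stated objective: alternative
-- what changed: A's per-coin in-place ascending sweep (dp[t] += dp[t-x]) is replaced by building a fresh table per coin via residue-class running prefix sums (column-major traversal over each chain t, t+x, t+2x, ...), skipping coins larger than target.
import Mathlib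
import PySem

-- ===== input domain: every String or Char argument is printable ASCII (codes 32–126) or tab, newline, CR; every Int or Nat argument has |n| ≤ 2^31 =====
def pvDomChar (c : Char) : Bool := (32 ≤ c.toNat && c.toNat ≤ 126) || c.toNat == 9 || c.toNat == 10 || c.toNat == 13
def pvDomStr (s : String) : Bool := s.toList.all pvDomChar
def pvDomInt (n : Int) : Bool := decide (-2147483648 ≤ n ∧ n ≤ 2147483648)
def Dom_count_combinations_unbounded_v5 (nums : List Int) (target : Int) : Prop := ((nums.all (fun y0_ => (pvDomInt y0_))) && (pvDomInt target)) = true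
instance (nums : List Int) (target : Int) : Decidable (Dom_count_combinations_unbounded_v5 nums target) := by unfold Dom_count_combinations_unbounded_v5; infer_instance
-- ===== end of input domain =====

-- B replaces A's per-coin in-place ascending sweep by a fresh table per coin
-- built from residue-class running prefix sums (alternative decomposition, same cost).

-- ===== PORT A =====
-- one coin's pass: for total in range(x, target+1): dp[total] += dp[total-x]
-- dp is an Array; indices are exact on the admitted inputs (0 ≤ total - x, total ≤ target,
-- so getD/setIfInBounds never hit their default/no-op branches under Pre_)
def pvStepA (target : Int) (dp : Array Int) (x : Int) : Array Int :=
  if x ≤ 0 then dp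
  else (PySem.List.pyRange x (target + 1) 1).foldl
    (fun dp total =>
      dp.setIfInBounds total.toNat
        (dp.getD total.toNat 0 + dp.getD (total - x).toNat 0)) dp

def count_combinations_unbounded_v5 (nums : List Int) (target : Int) : Int :=
  -- dp = [0] * (target + 1); dp[0] = 1  (dp[0] = 1 raises IndexError for target < 0: excluded by Pre_)
  let dp0 : Array Int := Array.replicate (target + 1).toNat 0
  let dp1 : Array Int := dp0.setIfInBounds 0 1
  let dpf : Array Int := nums.foldl (pvStepA target) dp1
  dpf.getD target.toNat 0

-- ===== PORT B =====
-- while t <= target: running += dp[t]; new[t] = running; t += x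
-- (the '0 < x' guard only makes the Python while-loop, which is always entered with
--  0 < x, a total Lean function; it never changes the computed value at a call site)
def pvChainB (target x : Int) (dp : Array Int) (t running : Int) (new : Array Int) : Array Int :=
  if 0 < x ∧ t ≤ target then
    pvChainB target x dp (t + x) (running + dp.getD t.toNat 0)
      (new.setIfInBounds t.toNat (running + dp.getD t.toNat 0))
  else new
termination_by (target + 1 - t).toNat
decreasing_by omega

def count_combinations_unbounded_v5_alt (nums : List Int) (target : Int) : Int :=
  let dp0 : Array Int := ((PySem.List.pyRange 0 (target + 1) 1).map (fun t => if t == 0 then 1 else 0)).toArray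
  let dpf : Array Int := nums.foldl (fun dp x =>
    if x ≤ 0 || target < x then dp
    else
      (PySem.List.pyRange 0 x 1).foldl
        (fun new s => pvChainB target x dp s 0 new)
        (Array.replicate (target + 1).toNat 0)) dp0
  dpf.getD target.toNat 0

-- ===== PRECONDITION & SPEC =====
-- Pre_ excludes exactly target < 0, where the Python A raises IndexError (dp is empty at dp[0] = 1).
def Pre_count_combinations_unbounded_v5 (nums : List Int) (target : Int) : Prop := 0 ≤ target
instance (nums : List Int) (target : Int) : Decidable (Pre_count_combinations_unbounded_v5 nums target) := by unfold Pre_count_combinations_unbounded_v5; infer_instance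

def pvWitness_count_combinations_unbounded_v5 : List Int × Int := ([1, 2, 5], 5)

def Spec_count_combinations_unbounded_v5 (nums : List Int) (target : Int) (out : Int) : Prop := out = count_combinations_unbounded_v5_alt nums target
instance (nums : List Int) (target : Int) (out : Int) : Decidable (Spec_count_combinations_unbounded_v5 nums target out) := by unfold Spec_count_combinations_unbounded_v5; infer_instance

-- ===== CLAIM (what is proved, stated in full; the proofs are below) =====
def Claim_equal_count_combinations_unbounded_v5 : Prop := ∀ (nums : List Int) (target : Int), Dom_count_combinations_unbounded_v5 nums target → Pre_count_combinations_unbounded_v5 nums target → Spec_count_combinations_unbounded_v5 nums target (count_combinations_unbounded_v5 nums target)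

-- ===== LEMMAS AND PROOFS =====

-- The common reference: number of multisets of positive coins from l summing to r
-- (coins taken from the list, unbounded reuse, non-positive coins ignored).
def pvW : List Int → Int → Int
  | l, r =>
    if r < 0 then 0
    else if r = 0 then 1
    else match l with
      | [] => 0
      | c :: cs =>
        if c ≤ 0 then pvW cs r
        else if r < c then pvW cs r
        else pvW cs r + pvW (c :: cs) (r - c)
termination_by l r => (l.length, r.toNat)
decreasing_by
  · exact Prod.Lex.left _ _ (by simp)
  · exact Prod.Lex.left _ _ (by simp)
  · exact Prod.Lex.left _ _ (by simp)
  · exact Prod.Lex.right _ (by omega)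

lemma pvW_neg (l : List Int) (r : Int) (h : r < 0) : pvW l r = 0 := by
  rw [pvW.eq_def]; simp [h]

lemma pvW_zero (l : List Int) : pvW l 0 = 1 := by
  rw [pvW.eq_def]; simp

lemma pvW_nil (r : Int) (h : r ≠ 0) : pvW [] r = 0 := by
  rw [pvW.eq_def]
  simp only []
  split_ifs <;> simp_all

lemma pvW_skip (c : Int) (cs : List Int) (r : Int) (h : c ≤ 0) :
    pvW (c :: cs) r = pvW cs r := by
  by_cases h1 : r < 0
  · rw [pvW_neg _ _ h1, pvW_neg _ _ h1]
  · by_cases h2 : r = 0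
    · rw [h2, pvW_zero, pvW_zero]
    · conv_lhs => rw [pvW.eq_def]
      simp [h1, h2, h]

lemma pvW_lt (c : Int) (cs : List Int) (r : Int) (h0 : 0 ≤ r) (h : r < c) :
    pvW (c :: cs) r = pvW cs r := by
  by_cases h2 : r = 0
  · rw [h2, pvW_zero, pvW_zero]
  · conv_lhs => rw [pvW.eq_def]
    simp only [if_neg (by omega : ¬ r < 0), if_neg h2]
    simp only [if_neg (by omega : ¬ c ≤ 0), if_pos h]

lemma pvW_ge (c : Int) (cs : List Int) (r : Int) (hc : 0 < c) (h : c ≤ r) :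
    pvW (c :: cs) r = pvW cs r + pvW (c :: cs) (r - c) := by
  conv_lhs => rw [pvW.eq_def]
  simp only [if_neg (by omega : ¬ r < 0), if_neg (by omega : ¬ r = 0)]
  simp only [if_neg (by omega : ¬ c ≤ 0), if_neg (by omega : ¬ r < c)]

lemma pvW_step (c : Int) (cs : List Int) (r : Int) (hc : 0 < c) (h0 : 0 ≤ r) :
    pvW (c :: cs) r = pvW cs r + pvW (c :: cs) (r - c) := by
  by_cases h : c ≤ r
  · exact pvW_ge c cs r hc h
  · have hneg : pvW (c :: cs) (r - c) = 0 := pvW_neg _ _ (by omega)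
    rw [pvW_lt c cs r h0 (by omega), hneg, add_zero]

-- The table invariant shared by both ports.
def pvInv (T : Int) (l : List Int) (dp : Array Int) : Prop :=
  dp.size = (T + 1).toNat ∧
  ∀ t : Int, 0 ≤ t → t ≤ T → dp.getD t.toNat 0 = pvW l t

lemma pvFold_inv (T : Int) (step : Array Int → Int → Array Int)
    (hstep : ∀ l dp x, pvInv T l dp → pvInv T (x :: l) (step dp x)) :
    ∀ (ns : List Int) (l : List Int) (dp : Array Int), pvInv T l dp →
      pvInv T (ns.reverse ++ l) (ns.foldl step dp) := by
  intro ns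
  induction ns with
  | nil => intro l dp h; simpa using h
  | cons x xs ih =>
    intro l dp h
    have := ih (x :: l) (step dp x) (hstep l dp x h)
    simpa using this

-- getD after a set, Int index form
lemma pvGetD_setD (xs : Array Int) (i m : Int) (v : Int)
    (h0 : 0 ≤ i) (h1 : i < xs.size) (hm : 0 ≤ m) :
    (xs.setIfInBounds i.toNat v).getD m.toNat 0 =
      if m = i then v else xs.getD m.toNat 0 := by
  by_cases hms : m.toNat < xs.size
  · rw [Array.getD_eq_getD_getElem?, Array.getD_eq_getD_getElem?]
    rw [Array.getElem?_eq_getElem hms,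
        Array.getElem?_eq_getElem (by rw [Array.size_setIfInBounds]; exact hms)]
    rw [Array.getElem_setIfInBounds]
    simp only [Option.getD_some]
    split_ifs with ha hb
    all_goals first | rfl | omega
  · have hne : ¬ m = i := by omega
    rw [if_neg hne]
    rw [Array.getD_eq_getD_getElem?, Array.getD_eq_getD_getElem?]
    rw [Array.getElem?_eq_none (xs := xs.setIfInBounds i.toNat v) (by rw [Array.size_setIfInBounds]; omega),
        Array.getElem?_eq_none (by omega)]

-- ----- A side -----
lemma pvStepA_inner (T x : Int) (hx : 0 < x) (l : List Int) :
    ∀ (m : Nat) (n : Int) (dp : Array Int), 0 ≤ n → (T + 1 - (x + n)).toNat = m →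
      dp.size = (T + 1).toNat →
      (∀ t : Int, 0 ≤ t → t ≤ T → t < x + n → dp.getD t.toNat 0 = pvW (x :: l) t) →
      (∀ t : Int, 0 ≤ t → t ≤ T → x + n ≤ t → dp.getD t.toNat 0 = pvW l t) →
      pvInv T (x :: l)
        ((PySem.List.pyRange (x + n) (T + 1) 1).foldl
          (fun dp total =>
            dp.setIfInBounds total.toNat
              (dp.getD total.toNat 0 + dp.getD (total - x).toNat 0)) dp) := by
  intro m
  induction m with
  | zero =>
    intro n dp hn hm hlen hlow _hhigh
    rw [PySem.List.pyRange_one_eq_nil (by omega)]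
    exact ⟨hlen, fun t ht0 htT => hlow t ht0 htT (by omega)⟩
  | succ m ih =>
    intro n dp hn hm hlen hlow hhigh
    have hi : x + n < T + 1 := by omega
    rw [PySem.List.pyRange_one_cons hi, List.foldl_cons]
    have hlen' : ((x + n : Int)) < (dp.size : Int) := by rw [hlen]; omega
    have hvi : dp.getD (x + n).toNat 0 = pvW l (x + n) :=
      hhigh (x + n) (by omega) (by omega) le_rfl
    have hvn : dp.getD (x + n - x).toNat 0 = pvW (x :: l) n := by
      have : x + n - x = n := by ring
      rw [this]; exact hlow n hn (by omega) (by omega)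
    have hcomb : dp.getD (x + n).toNat 0 + dp.getD (x + n - x).toNat 0
        = pvW (x :: l) (x + n) := by
      rw [hvi, hvn, pvW_step x l (x + n) hx (by omega)]
      have : x + n - x = n := by ring
      rw [this]
    have hstep : x + n + 1 = x + (n + 1) := by ring
    rw [hstep]
    apply ih (n + 1) _ (by omega) (by omega)
    · rw [Array.size_setIfInBounds]; exact hlen
    · intro t ht0 htT htl
      rw [pvGetD_setD _ _ _ _ (by omega) hlen' ht0]
      by_cases he : t = x + n
      · rw [if_pos he, hcomb, he]
      · rw [if_neg he]
        exact hlow t ht0 htT (by omega)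
    · intro t ht0 htT htg
      rw [pvGetD_setD _ _ _ _ (by omega) hlen' ht0, if_neg (by omega)]
      exact hhigh t ht0 htT (by omega)

lemma pvStepA_inv (T : Int) (hT : 0 ≤ T) :
    ∀ l dp x, pvInv T l dp → pvInv T (x :: l) (pvStepA T dp x) := by
  intro l dp x hinv
  unfold pvStepA
  by_cases hx : x ≤ 0
  · rw [if_pos hx]
    exact ⟨hinv.1, fun t ht0 htT => by rw [hinv.2 t ht0 htT, pvW_skip x l t hx]⟩
  · rw [if_neg hx]
    have hx' : 0 < x := by omega
    have := pvStepA_inner T x hx' l (T + 1 - x).toNat 0 dp le_rfl (by omega) hinv.1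
      (fun t ht0 htT htl => by
        rw [hinv.2 t ht0 htT, pvW_lt x l t ht0 (by omega)])
      (fun t ht0 htT _ => hinv.2 t ht0 htT)
    simpa using this

-- ----- B side -----
lemma pvChainB_spec (T x : Int) (hx : 0 < x) (l : List Int) (dp : Array Int)
    (hdp : ∀ r : Int, 0 ≤ r → r ≤ T → dp.getD r.toNat 0 = pvW l r) :
    ∀ (m : Nat) (t running : Int) (new : Array Int), 0 ≤ t → (T + 1 - t).toNat ≤ m →
      running = pvW (x :: l) (t - x) → new.size = (T + 1).toNat →
      (pvChainB T x dp t running new).size = (T + 1).toNat ∧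
      (∀ r : Int, 0 ≤ r → r ≤ T → (∃ k : Nat, r = t + k * x) →
        (pvChainB T x dp t running new).getD r.toNat 0 = pvW (x :: l) r) ∧
      (∀ r : Int, 0 ≤ r → r ≤ T → (¬ ∃ k : Nat, r = t + k * x) →
        (pvChainB T x dp t running new).getD r.toNat 0 = new.getD r.toNat 0) := by
  intro m
  induction m with
  | zero =>
    intro t running new ht0 hm hrun hnew
    rw [pvChainB, if_neg (by omega)]
    refine ⟨hnew, ?_, fun r _ _ _ => rfl⟩
    intro r hr0 hrT ⟨k, hk⟩
    exfalso
    have : (0:Int) ≤ (k : Int) * x := mul_nonneg (by positivity) (le_of_lt hx)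
    omega
  | succ m ih =>
    intro t running new ht0 hm hrun hnew
    by_cases ht : t ≤ T
    · rw [pvChainB, if_pos ⟨hx, ht⟩]
      have hlen' : t < (new.size : Int) := by rw [hnew]; omega
      have hv : running + dp.getD t.toNat 0 = pvW (x :: l) t := by
        rw [hrun, hdp t ht0 ht, pvW_step x l t hx ht0, add_comm]
      obtain ⟨ih1, ih2, ih3⟩ := ih (t + x) (running + dp.getD t.toNat 0)
        (new.setIfInBounds t.toNat (running + dp.getD t.toNat 0))
        (by omega) (by omega)
        (by rw [hv]; congr 1; ring)
        (by rw [Array.size_setIfInBounds]; exact hnew)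
      refine ⟨ih1, ?_, ?_⟩
      · intro r hr0 hrT ⟨k, hk⟩
        match k, hk with
        | 0, hk =>
          have hrt : r = t := by push_cast at hk; omega
          have hnot : ¬ ∃ k' : Nat, r = (t + x) + k' * x := by
            rintro ⟨k', hk'⟩
            have : (0:Int) ≤ (k' : Int) * x := mul_nonneg (by positivity) (le_of_lt hx)
            omega
          rw [ih3 r hr0 hrT hnot,
            pvGetD_setD new t r _ ht0 hlen' hr0, if_pos hrt, hv, hrt]
        | (k'+1), hk =>
          apply ih2 r hr0 hrT
          refine ⟨k', ?_⟩
          push_cast at hk ⊢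
          linarith
      · intro r hr0 hrT hnot
        have hnot' : ¬ ∃ k' : Nat, r = (t + x) + k' * x := by
          rintro ⟨k', hk'⟩
          exact hnot ⟨k' + 1, by push_cast at hk' ⊢; linarith⟩
        have hrt : r ≠ t := fun he => hnot ⟨0, by push_cast; omega⟩
        rw [ih3 r hr0 hrT hnot',
          pvGetD_setD _ _ _ _ ht0 hlen' hr0, if_neg hrt]
    · rw [pvChainB, if_neg (by omega)]
      refine ⟨hnew, ?_, fun r _ _ _ => rfl⟩
      intro r hr0 hrT ⟨k, hk⟩
      exfalso
      have : (0:Int) ≤ (k : Int) * x := mul_nonneg (by positivity) (le_of_lt hx)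
      omega

-- after the chains for residues 0 ≤ s' < s are done
def pvDone (x s r : Int) : Prop := ∃ s' : Int, ∃ k : Nat, 0 ≤ s' ∧ s' < s ∧ r = s' + k * x

lemma pvDone_full (x r : Int) (hx : 0 < x) (hr : 0 ≤ r) : pvDone x x r := by
  have h1 : 0 ≤ r % x := Int.emod_nonneg r (by omega)
  have h2 : r % x < x := Int.emod_lt_of_pos r hx
  have h3 : 0 ≤ r / x := Int.ediv_nonneg hr (le_of_lt hx)
  have h4 : x * (r / x) + r % x = r := Int.mul_ediv_add_emod r x
  refine ⟨r % x, (r / x).toNat, h1, h2, ?_⟩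
  rw [Int.toNat_of_nonneg h3]
  linarith

lemma pvOuterB (T x : Int) (hx : 0 < x) (l : List Int) (dp : Array Int)
    (hdp : ∀ r : Int, 0 ≤ r → r ≤ T → dp.getD r.toNat 0 = pvW l r) :
    ∀ (m : Nat) (s : Int) (new : Array Int), 0 ≤ s → s ≤ x → (x - s).toNat = m →
      new.size = (T + 1).toNat →
      (∀ r : Int, 0 ≤ r → r ≤ T → pvDone x s r → new.getD r.toNat 0 = pvW (x :: l) r) →
      (∀ r : Int, 0 ≤ r → r ≤ T → ¬ pvDone x s r → new.getD r.toNat 0 = 0) →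
      ((PySem.List.pyRange s x 1).foldl (fun new s => pvChainB T x dp s 0 new) new).size
        = (T + 1).toNat ∧
      ∀ r : Int, 0 ≤ r → r ≤ T →
        ((PySem.List.pyRange s x 1).foldl (fun new s => pvChainB T x dp s 0 new) new).getD r.toNat 0
          = pvW (x :: l) r := by
  intro m
  induction m with
  | zero =>
    intro s new hs0 hsx hm hlen hdone _hzero
    have hsx' : s = x := by omega
    rw [PySem.List.pyRange_one_eq_nil (by omega)]
    subst hsx'
    exact ⟨hlen, fun r hr0 hrT => hdone r hr0 hrT (pvDone_full s r hx hr0)⟩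
  | succ m ih =>
    intro s new hs0 hsx hm hlen hdone hzero
    by_cases hlt : s < x
    · rw [PySem.List.pyRange_one_cons hlt, List.foldl_cons]
      obtain ⟨hc1, hc2, hc3⟩ := pvChainB_spec T x hx l dp hdp (T + 1 - s).toNat s 0 new
        hs0 le_rfl (by rw [pvW_neg (x :: l) (s - x) (by omega)]) hlen
      apply ih (s + 1) _ (by omega) (by omega) (by omega) hc1
      · intro r hr0 hrT hd
        by_cases hch : ∃ k : Nat, r = s + k * x
        · exact hc2 r hr0 hrT hch
        · rw [hc3 r hr0 hrT hch]
          obtain ⟨s', k, hs'0, hs'1, hr⟩ := hd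
          have hne : s' ≠ s := fun he => hch ⟨k, by rw [← he]; exact hr⟩
          exact hdone r hr0 hrT ⟨s', k, hs'0, by omega, hr⟩
      · intro r hr0 hrT hd
        have hch : ¬ ∃ k : Nat, r = s + k * x := by
          rintro ⟨k, hk⟩
          exact hd ⟨s, k, hs0, by omega, hk⟩
        rw [hc3 r hr0 hrT hch]
        apply hzero r hr0 hrT
        rintro ⟨s', k, hs'0, hs'1, hr⟩
        exact hd ⟨s', k, hs'0, by omega, hr⟩
    · have hsx' : s = x := by omega
      rw [PySem.List.pyRange_one_eq_nil (by omega)]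
      subst hsx'
      exact ⟨hlen, fun r hr0 hrT => hdone r hr0 hrT (pvDone_full s r hx hr0)⟩

lemma pvGetD_replicate (N : Nat) (t : Int) :
    (Array.replicate N (0:Int)).getD t.toNat 0 = 0 := by
  rw [Array.getD_eq_getD_getElem?, Array.getElem?_replicate]
  split <;> simp

lemma pvStepB_inv (T : Int) (hT : 0 ≤ T) :
    ∀ l dp x, pvInv T l dp →
      pvInv T (x :: l)
        (if x ≤ 0 || T < x then dp
         else (PySem.List.pyRange 0 x 1).foldl
           (fun new s => pvChainB T x dp s 0 new)
           (Array.replicate (T + 1).toNat 0)) := by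
  intro l dp x hinv
  by_cases hx : x ≤ 0
  · rw [if_pos (by simp [hx])]
    exact ⟨hinv.1, fun t ht0 htT => by rw [hinv.2 t ht0 htT, pvW_skip x l t hx]⟩
  · have hx' : 0 < x := by omega
    by_cases hxT : T < x
    · rw [if_pos (by simp [hxT])]
      exact ⟨hinv.1, fun t ht0 htT => by
        rw [hinv.2 t ht0 htT, pvW_lt x l t ht0 (by omega)]⟩
    · rw [if_neg (by simp; omega)]
      obtain ⟨h1, h2⟩ := pvOuterB T x hx' l dp hinv.2 x.toNat 0
        (Array.replicate (T + 1).toNat 0) le_rfl (le_of_lt hx') (by omega)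
        (by simp)
        (fun r hr0 hrT hd => by
          exfalso; obtain ⟨s', k, hs'0, hs'1, _⟩ := hd; omega)
        (fun r hr0 hrT _ => pvGetD_replicate _ _)
      exact ⟨h1, fun t ht0 htT => h2 t ht0 htT⟩

-- ----- initial tables -----
lemma pvInitA (T : Int) (hT : 0 ≤ T) :
    pvInv T [] ((Array.replicate (T + 1).toNat 0).setIfInBounds 0 1) := by
  constructor
  · rw [Array.size_setIfInBounds]; simp
  · intro t ht0 htT
    have h := pvGetD_setD (Array.replicate (T + 1).toNat 0) 0 t 1 le_rfl
      (by simp; omega) ht0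
    simp only [Int.toNat_zero] at h
    rw [h]
    by_cases h0 : t = 0
    · rw [if_pos h0, h0, pvW_zero]
    · rw [if_neg h0, pvW_nil t h0, pvGetD_replicate]

lemma pvGetD_initB (T t : Int) (f : Int → Int) (h0 : 0 ≤ t) (h1 : t ≤ T) :
    (((PySem.List.pyRange 0 (T + 1) 1).map f).toArray).getD t.toNat 0 = f t := by
  rw [Array.getD_eq_getD_getElem?, List.getElem?_toArray]
  have hlen : t.toNat < (List.map f (PySem.List.pyRange 0 (T + 1) 1)).length := by
    rw [List.length_map, PySem.List.length_pyRange_one]; omega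
  rw [List.getElem?_eq_getElem hlen]
  simp only [List.getElem_map, PySem.List.getElem_pyRange_one, Option.getD_some]
  congr 1; omega

lemma pvInitB (T : Int) (hT : 0 ≤ T) :
    pvInv T [] (((PySem.List.pyRange 0 (T + 1) 1).map (fun t => if t == 0 then 1 else 0)).toArray) := by
  constructor
  · rw [List.size_toArray, List.length_map, PySem.List.length_pyRange_one]; omega
  · intro t ht0 htT
    rw [pvGetD_initB T t _ ht0 htT]
    by_cases h : t = 0
    · simp [h, pvW_zero]
    · simp only [beq_iff_eq, if_neg h]
      rw [pvW_nil t h]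

-- ===== VERDICT (by name: the statement is the Claim_ definition above) =====
theorem count_combinations_unbounded_v5_spec : Claim_equal_count_combinations_unbounded_v5 := by
  intro nums target _hdom hpre
  unfold Spec_count_combinations_unbounded_v5
  have hT : (0:Int) ≤ target := hpre
  have hA := pvFold_inv target (pvStepA target) (pvStepA_inv target hT) nums []
    _ (pvInitA target hT)
  have hB := pvFold_inv target _ (pvStepB_inv target hT) nums [] _ (pvInitB target hT)
  unfold count_combinations_unbounded_v5 count_combinations_unbounded_v5_alt
  simp only [List.append_nil] at hA hB
  rw [hA.2 target hT le_rfl, hB.2 target hT le_rfl]
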